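-- pv_equiv track=rewrite | github.com/benquick123/code-profiling | code/batch-1/vse-naloge-brez-testov/DN7-M-99.py | varen_premik
-- ===== SOURCE A (Python) =====
-- def varen_premik(x0, y0, x1, y1, mine):
--
--
--     if x0 == x1:
--         if y1 < y0:
--             y0, y1 = y1, y0
--         for i in range(y0, y1 + 1):
--                 if (x0, i) in mine:
--                     return False
--     else:
--         if x1 < x0:
--             x0, x1 = x1, x0
--         for i in range(x0, x1 + 1):
--             if (i, y0) in mine:
--                 return False
--
--     return True
-- ===== SOURCE B (Python) =====
-- def varen_premik(x0, y0, x1, y1, mine):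
--     # Scan the mines instead of every cell of the path: O(|mine|) not O(path length).
--     if x0 == x1:
--         lo, hi = (y0, y1) if y0 <= y1 else (y1, y0)
--         for mx, my in mine:
--             if mx == x0 and lo <= my <= hi:
--                 return False
--     else:
--         lo, hi = (x0, x1) if x0 <= x1 else (x1, x0)
--         for mx, my in mine:
--             if my == y0 and lo <= mx <= hi:
--                 return False
--     return True
-- ===== Notes on version B (the rewrite author's own statement) =====
-- stated objective: faster
-- what changed: B iterates over the mine list checking each mine against the segment's fixed coordinate and inclusive interval, instead of A's loop over every integer cell of the path testing membership in mine.
import Mathlib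
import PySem

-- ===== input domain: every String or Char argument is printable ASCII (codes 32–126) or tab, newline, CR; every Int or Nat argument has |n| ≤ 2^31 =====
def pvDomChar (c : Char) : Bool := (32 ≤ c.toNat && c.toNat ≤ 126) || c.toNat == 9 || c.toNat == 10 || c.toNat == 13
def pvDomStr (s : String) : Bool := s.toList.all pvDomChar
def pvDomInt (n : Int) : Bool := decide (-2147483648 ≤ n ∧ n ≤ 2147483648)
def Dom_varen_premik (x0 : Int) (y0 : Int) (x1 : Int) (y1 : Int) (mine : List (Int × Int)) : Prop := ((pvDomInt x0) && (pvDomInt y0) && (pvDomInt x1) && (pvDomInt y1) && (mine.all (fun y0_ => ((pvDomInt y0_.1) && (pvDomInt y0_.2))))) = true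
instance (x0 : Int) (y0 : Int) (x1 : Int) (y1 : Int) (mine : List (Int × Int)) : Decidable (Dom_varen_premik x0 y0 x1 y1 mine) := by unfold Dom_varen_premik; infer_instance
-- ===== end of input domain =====

-- B scans the mine list against the segment's fixed coordinate and inclusive interval,
-- instead of A's per-cell loop over the path testing membership in mine (objective: faster).

-- ===== PORT A =====
-- the for-loop body of A: walk the path cells, return False on the first cell found in mine
def mineLoop (mk : Int → Int × Int) (ys : List Int) (mine : List (Int × Int)) : Bool :=
  match ys with
  | [] => true
  | i :: rest => if mine.contains (mk i) then false else mineLoop mk rest mine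

def varen_premik (x0 : Int) (y0 : Int) (x1 : Int) (y1 : Int) (mine : List (Int × Int)) : Bool :=
  if x0 == x1 then
    -- 'if y1 < y0: y0, y1 = y1, y0'
    let yl := if y1 < y0 then y1 else y0
    let yh := if y1 < y0 then y0 else y1
    mineLoop (fun i => (x0, i)) (PySem.List.pyRange yl (yh + 1) 1) mine
  else
    -- 'if x1 < x0: x0, x1 = x1, x0'
    let xl := if x1 < x0 then x1 else x0
    let xh := if x1 < x0 then x0 else x1
    mineLoop (fun i => (i, y0)) (PySem.List.pyRange xl (xh + 1) 1) mine

-- ===== PORT B =====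
-- the for-loop of B: walk the mines, return False on the first mine hitting the segment
def scanMines (p : Int × Int → Bool) : List (Int × Int) → Bool
  | [] => true
  | m :: rest => if p m then false else scanMines p rest

def varen_premik_alt (x0 : Int) (y0 : Int) (x1 : Int) (y1 : Int) (mine : List (Int × Int)) : Bool :=
  if x0 == x1 then
    let lo := if y0 ≤ y1 then y0 else y1
    let hi := if y0 ≤ y1 then y1 else y0
    scanMines (fun m => m.1 == x0 && (lo ≤ m.2 && m.2 ≤ hi)) mine
  else
    let lo := if x0 ≤ x1 then x0 else x1
    let hi := if x0 ≤ x1 then x1 else x0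
    scanMines (fun m => m.2 == y0 && (lo ≤ m.1 && m.1 ≤ hi)) mine

-- ===== PRECONDITION & SPEC =====
def Spec_varen_premik (x0 : Int) (y0 : Int) (x1 : Int) (y1 : Int) (mine : List (Int × Int)) (out : Bool) : Prop := out = varen_premik_alt x0 y0 x1 y1 mine
instance (x0 : Int) (y0 : Int) (x1 : Int) (y1 : Int) (mine : List (Int × Int)) (out : Bool) : Decidable (Spec_varen_premik x0 y0 x1 y1 mine out) := by unfold Spec_varen_premik; infer_instance

-- ===== CLAIM (what is proved, stated in full; the proofs are below) =====
def Claim_equal_varen_premik : Prop := ∀ (x0 : Int) (y0 : Int) (x1 : Int) (y1 : Int) (mine : List (Int × Int)), Dom_varen_premik x0 y0 x1 y1 mine → Spec_varen_premik x0 y0 x1 y1 mine (varen_premik x0 y0 x1 y1 mine)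

-- ===== LEMMAS AND PROOFS =====

-- ===== VERDICT (by name: the statement is the Claim_ definition above) =====
lemma mineLoop_eq_true_iff (mk : Int → Int × Int) (ys : List Int) (mine : List (Int × Int)) :
    mineLoop mk ys mine = true ↔ ∀ i ∈ ys, mk i ∉ mine := by
  induction ys with
  | nil => simp [mineLoop]
  | cons i rest ih =>
    simp only [mineLoop, List.mem_cons]
    by_cases h : mine.contains (mk i)
    · simp only [h, if_true]
      constructor
      · intro hf; cases hf
      · intro hall
        exact absurd ((List.contains_iff_mem).mp h) (hall i (Or.inl rfl))
    · simp only [h, Bool.false_eq_true, if_false, ih]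
      constructor
      · intro hall j hj
        rcases hj with rfl | hj
        · intro hmem
          exact h ((List.contains_iff_mem).mpr hmem)
        · exact hall j hj
      · intro hall j hj
        exact hall j (Or.inr hj)

lemma scanMines_eq_true_iff (p : Int × Int → Bool) (mine : List (Int × Int)) :
    scanMines p mine = true ↔ ∀ m ∈ mine, p m = false := by
  induction mine with
  | nil => simp [scanMines]
  | cons m rest ih =>
    simp only [scanMines, List.mem_cons]
    by_cases h : p m
    · simp only [h, if_true]
      constructor
      · intro hf; cases hf
      · intro hall
        have := hall m (Or.inl rfl); simp [h] at this
    · simp only [h, Bool.false_eq_true, if_false, ih]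
      constructor
      · intro hall j hj
        rcases hj with rfl | hj
        · simpa using h
        · exact hall j hj
      · intro hall j hj
        exact hall j (Or.inr hj)

lemma loop_eq_scan_v (x lo hi : Int) (mine : List (Int × Int)) :
    mineLoop (fun i => (x, i)) (PySem.List.pyRange lo (hi + 1) 1) mine
      = scanMines (fun m => m.1 == x && (lo ≤ m.2 && m.2 ≤ hi)) mine := by
  rw [Bool.eq_iff_iff, mineLoop_eq_true_iff, scanMines_eq_true_iff]
  constructor
  · intro hall m hm
    rcases m with ⟨mx, my⟩
    by_cases hx : mx = x
    · by_cases hy : lo ≤ my ∧ my ≤ hi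
      · exfalso
        refine hall my ?_ ?_
        · rw [PySem.List.mem_pyRange_one]; omega
        · subst hx; exact hm
      · simp only [Bool.and_eq_false_iff, decide_eq_false_iff_not]
        right; omega
    · simp [hx]
  · intro hall i hi' hmem
    rw [PySem.List.mem_pyRange_one] at hi'
    have := hall (x, i) hmem
    simp at this
    omega

lemma loop_eq_scan_h (y lo hi : Int) (mine : List (Int × Int)) :
    mineLoop (fun i => (i, y)) (PySem.List.pyRange lo (hi + 1) 1) mine
      = scanMines (fun m => m.2 == y && (lo ≤ m.1 && m.1 ≤ hi)) mine := by
  rw [Bool.eq_iff_iff, mineLoop_eq_true_iff, scanMines_eq_true_iff]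
  constructor
  · intro hall m hm
    rcases m with ⟨mx, my⟩
    by_cases hy : my = y
    · by_cases hx : lo ≤ mx ∧ mx ≤ hi
      · exfalso
        refine hall mx ?_ ?_
        · rw [PySem.List.mem_pyRange_one]; omega
        · subst hy; exact hm
      · simp only [Bool.and_eq_false_iff, decide_eq_false_iff_not]
        right; omega
    · simp [hy]
  · intro hall i hi' hmem
    rw [PySem.List.mem_pyRange_one] at hi'
    have := hall (i, y) hmem
    simp at this
    omega

theorem varen_premik_spec : Claim_equal_varen_premik := by
  intro x0 y0 x1 y1 mine _
  unfold Spec_varen_premik varen_premik varen_premik_alt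
  by_cases hx : x0 = x1
  · simp only [hx, beq_self_eq_true, if_true]
    by_cases h : y1 < y0
    · have h' : ¬ (y0 ≤ y1) := by omega
      simp only [h, h', if_true, if_false]
      exact loop_eq_scan_v x1 y1 y0 mine
    · have h' : y0 ≤ y1 := by omega
      simp only [h, h', if_true, if_false]
      exact loop_eq_scan_v x1 y0 y1 mine
  · simp only [beq_eq_false_iff_ne.mpr hx, Bool.false_eq_true, if_false]
    by_cases h : x1 < x0
    · have h' : ¬ (x0 ≤ x1) := by omega
      simp only [h, h', if_true, if_false]
      exact loop_eq_scan_h y0 x1 x0 mine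
    · have h' : x0 ≤ x1 := by omega
      simp only [h, h', if_true, if_false]
      exact loop_eq_scan_h y0 x0 x1 mine
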